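-- pv_equiv track=rewrite | github.com/marcuslissner/AoC25 | day2.py | find_all_repeating
-- ===== SOURCE A (Python) =====
-- def find_all_repeating(lower: int, upper: int):
--     range_sum = 0
--
--     for current in range(lower, upper + 1):
--         current_str = str(current)
--         current_len = len(current_str)
--         for chunk_count in range(2, current_len + 1):
--             if current_len % chunk_count != 0:
--                 continue
--             chunk_size = current_len // chunk_count
--             chunks = [current_str[i:i + chunk_size] for i in range(0, current_len, chunk_size)]
--             if len(chunks) > 1 and len(set(chunks)) == 1:
--                 range_sum += current
--                 break
--
--     return range_sum
-- ===== SOURCE B (Python) =====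
-- def find_all_repeating(lower: int, upper: int):
--     # shift test: s is a repetition of a smaller block iff for some divisor d < len(s),
--     # s shifted by d equals itself, i.e. s[d:] == s[:-d]
--     total = 0
--     for current in range(lower, upper + 1):
--         s = str(current)
--         n = len(s)
--         for d in range(1, n):
--             if n % d == 0 and s[d:] == s[:-d]:
--                 total += current
--                 break
--     return total
-- ===== Notes on version B (the rewrite author's own statement) =====
-- stated objective: simpler
-- what changed: A tests each number by slicing its digit string into chunk_count chunks and checking that the set of chunks has one element; B tests each number with a single shift comparison s[d:] == s[:-d] per divisor d, building no chunk list and no set.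
import Mathlib
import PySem

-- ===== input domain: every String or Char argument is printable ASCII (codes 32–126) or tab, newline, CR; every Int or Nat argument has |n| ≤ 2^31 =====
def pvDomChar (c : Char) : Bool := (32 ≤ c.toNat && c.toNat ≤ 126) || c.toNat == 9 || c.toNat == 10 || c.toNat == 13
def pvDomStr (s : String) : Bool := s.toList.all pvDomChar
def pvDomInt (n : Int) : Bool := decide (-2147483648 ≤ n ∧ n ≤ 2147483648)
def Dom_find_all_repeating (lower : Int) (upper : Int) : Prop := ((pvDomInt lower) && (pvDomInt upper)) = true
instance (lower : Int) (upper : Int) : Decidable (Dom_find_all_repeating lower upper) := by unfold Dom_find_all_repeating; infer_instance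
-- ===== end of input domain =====

-- B replaces A's chunk-list-and-set test by a single shift comparison s[d:] == s[:-d] per divisor d
-- (objective: simpler per-number repetition test; same asymptotic cost as A).

-- ===== PORT A =====
-- chunks = [current_str[i:i + chunk_size] for i in range(0, current_len, chunk_size)]
def pvChunksA (s : List Char) (L k : Int) : List (List Char) :=
  (PySem.List.pyRange 0 L k).map (fun i => PySem.List.slice s (some i) (some (i + k)))

-- inner 'for chunk_count in range(2, current_len + 1)' with continue/break;
-- returns true iff the loop breaks (i.e. current gets added)
def pvAInner (s : List Char) (L : Int) : List Int → Bool
  | [] => false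
  | c :: rest =>
    if PySem.Int.mod L c ≠ 0 then pvAInner s L rest
    else
      if 1 < (pvChunksA s L (PySem.Int.floordiv L c)).length ∧
          (PySem.Set.ofList (pvChunksA s L (PySem.Int.floordiv L c))).length = 1 then true
      else pvAInner s L rest

def find_all_repeating (lower : Int) (upper : Int) : Int :=
  (PySem.List.pyRange lower (upper + 1) 1).foldl
    (fun range_sum current =>
      if pvAInner (PySem.Int.toChars current) ((PySem.Int.toChars current).length : Int)
          (PySem.List.pyRange 2 (((PySem.Int.toChars current).length : Int) + 1) 1) then
        range_sum + current
      else range_sum) 0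

-- ===== PORT B =====
-- inner 'for d in range(1, n)' with break; true iff some divisor-shift matches (s[d:] == s[:-d])
def pvBInner (s : List Char) (n : Int) : List Int → Bool
  | [] => false
  | d :: rest =>
    if PySem.Int.mod n d = 0 ∧
        PySem.List.slice s (some d) none = PySem.List.slice s none (some (-d)) then true
    else pvBInner s n rest

def find_all_repeating_alt (lower : Int) (upper : Int) : Int :=
  (PySem.List.pyRange lower (upper + 1) 1).foldl
    (fun total current =>
      if pvBInner (PySem.Int.toChars current) ((PySem.Int.toChars current).length : Int)
          (PySem.List.pyRange 1 ((PySem.Int.toChars current).length : Int) 1) then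
        total + current
      else total) 0

-- ===== PRECONDITION & SPEC =====
def Spec_find_all_repeating (lower : Int) (upper : Int) (out : Int) : Prop := out = find_all_repeating_alt lower upper
instance (lower : Int) (upper : Int) (out : Int) : Decidable (Spec_find_all_repeating lower upper out) := by unfold Spec_find_all_repeating; infer_instance

-- ===== CLAIM (what is proved, stated in full; the proofs are below) =====
def Claim_equal_find_all_repeating : Prop := ∀ (lower : Int) (upper : Int), Dom_find_all_repeating lower upper → Spec_find_all_repeating lower upper (find_all_repeating lower upper)

-- ===== LEMMAS AND PROOFS =====

-- s is a repetition of its k-prefix, c times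
def pvRep (s : List Char) (k c : Nat) : Prop := s = (List.replicate c (s.take k)).flatten

lemma pv_step (s : List Char) (k c : Nat)
    (h : s.drop k = (List.replicate c (s.take k)).flatten) :
    s = (List.replicate (c + 1) (s.take k)).flatten := by
  conv_lhs => rw [← List.take_append_drop k s, h]
  rw [List.replicate_succ, List.flatten_cons]

lemma pv_chunk_of_rep (t : List Char) (k c j : Nat) (ht : t.length = k) (hj : j < c) :
    (((List.replicate c t).flatten).drop (j * k)).take k = t := by
  induction j generalizing c with
  | zero =>
    cases c with
    | zero => omega
    | succ c => simp [List.replicate_succ, ← ht]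
  | succ j ih =>
    cases c with
    | zero => omega
    | succ c =>
      have hdrop : ((List.replicate (c + 1) t).flatten).drop ((j + 1) * k)
          = ((List.replicate c t).flatten).drop (j * k) := by
        rw [List.replicate_succ, List.flatten_cons, List.drop_append]
        have hk1 : t.length ≤ (j + 1) * k := by
          rw [ht]
          calc k = 1 * k := (Nat.one_mul k).symm
            _ ≤ (j + 1) * k := Nat.mul_le_mul_right k (by omega)
        have h1 : t.drop ((j + 1) * k) = [] := List.drop_eq_nil_of_le hk1
        have h2 : (j + 1) * k - t.length = j * k := by
          rw [ht, Nat.succ_mul, Nat.add_sub_cancel]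
        rw [h1, h2, List.nil_append]
      rw [hdrop]
      exact ih c (by omega)

lemma pv_chunks_iff_rep (s : List Char) (k c : Nat) (hk : 0 < k) (hL : s.length = c * k) :
    (∀ j < c, (s.drop (j * k)).take k = s.take k) ↔ pvRep s k c := by
  unfold pvRep
  constructor
  · intro hall
    induction c generalizing s with
    | zero =>
      have : s = [] := List.eq_nil_of_length_eq_zero (by omega)
      simp [this]
    | succ c ih =>
      cases c with
      | zero =>
        have h1 : s.take k = s := List.take_of_length_le (by omega)
        simp [h1]
      | succ c =>
        have h1 : (s.drop k).take k = s.take k := by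
          have := hall 1 (by omega); simpa using this
        have hL' : (s.drop k).length = (c + 1) * k := by
          rw [List.length_drop, hL]; ring_nf; omega
        have hall' : ∀ j < c + 1, ((s.drop k).drop (j * k)).take k = (s.drop k).take k := by
          intro j hj
          rw [List.drop_drop, h1]
          have h2 := hall (j + 1) (by omega)
          rw [Nat.succ_mul, Nat.add_comm] at h2
          exact h2
        have h3 := ih (s.drop k) hL' hall'
        rw [h1] at h3
        exact pv_step s k (c + 1) h3
  · intro h j hj
    have hkle : k ≤ s.length := by
      rw [hL]
      calc k = 1 * k := (Nat.one_mul k).symm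
        _ ≤ c * k := Nat.mul_le_mul_right k (by omega)
    have ht : (s.take k).length = k := by
      rw [List.length_take]; omega
    rw [show (s.take k : List Char) = ((s.drop (0 * k)).take k) from by
      rw [Nat.zero_mul, List.drop_zero]]
    conv_lhs => rw [h]
    conv_rhs => rw [h]
    rw [pv_chunk_of_rep (s.take k) k c j ht hj,
        pv_chunk_of_rep (s.take k) k c 0 ht (by omega)]

lemma pv_shift_iff_rep (s : List Char) (k c : Nat) (hk : 0 < k) (hL : s.length = c * k) :
    (s.drop k = s.take (s.length - k)) ↔ pvRep s k c := by
  unfold pvRep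
  constructor
  · intro h
    induction c generalizing s with
    | zero =>
      have : s = [] := List.eq_nil_of_length_eq_zero (by omega)
      simp [this]
    | succ c ih =>
      cases c with
      | zero =>
        have h1 : s.take k = s := List.take_of_length_le (by omega)
        simp [h1]
      | succ c =>
        have hL' : (s.drop k).length = (c + 1) * k := by
          rw [List.length_drop, hL]; ring_nf; omega
        have hshift' : (s.drop k).drop k = (s.drop k).take ((s.drop k).length - k) := by
          conv_lhs => rw [h]
          rw [List.drop_take, List.length_drop]
        have htk : (s.drop k).take k = s.take k := by
          rw [h, List.take_take]
          have h2k : k + k ≤ s.length := by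
            rw [hL]
            calc k + k = 2 * k := by ring
              _ ≤ (c + 1 + 1) * k := Nat.mul_le_mul_right k (by omega)
          have hmin : min k (s.length - k) = k := by omega
          rw [hmin]
        have h3 := ih (s.drop k) hL' hshift'
        rw [htk] at h3
        exact pv_step s k (c + 1) h3
  · intro h
    cases c with
    | zero =>
      have h0 : s = [] := List.eq_nil_of_length_eq_zero (by omega)
      simp [h0]
    | succ c =>
      have hkle : k ≤ s.length := by
        rw [hL]
        calc k = 1 * k := (Nat.one_mul k).symm
          _ ≤ (c + 1) * k := Nat.mul_le_mul_right k (by omega)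
      have ht : (s.take k).length = k := by rw [List.length_take]; omega
      set t := s.take k with htdef
      have hsplit1 : s = t ++ (List.replicate c t).flatten := by
        conv_lhs => rw [h]
        rw [List.replicate_succ, List.flatten_cons]
      have hsplit2 : s = (List.replicate c t).flatten ++ t := by
        conv_lhs => rw [h]
        rw [List.replicate_succ', List.flatten_append]
        simp
      have hlenR : ((List.replicate c t).flatten).length = s.length - k := by
        have h1 : ((List.replicate c t).flatten).length = c * k := by
          simp [List.length_flatten, ht]
        have h2 : s.length = c * k + k := by rw [hL]; ring
        omega
      calc s.drop k = (t ++ (List.replicate c t).flatten).drop t.length := by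
            rw [← ht, ← hsplit1]
        _ = (List.replicate c t).flatten := List.drop_left
        _ = ((List.replicate c t).flatten ++ t).take ((List.replicate c t).flatten).length :=
            List.take_left.symm
        _ = s.take (s.length - k) := by rw [hlenR, ← hsplit2]

-- any-characterisation of the two break loops
lemma pvAInner_iff (s : List Char) (L : Int) (cs : List Int) :
    pvAInner s L cs = true ↔ ∃ c ∈ cs, PySem.Int.mod L c = 0 ∧
      1 < (pvChunksA s L (PySem.Int.floordiv L c)).length ∧
      (PySem.Set.ofList (pvChunksA s L (PySem.Int.floordiv L c))).length = 1 := by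
  induction cs with
  | nil => simp [pvAInner]
  | cons c rest ih =>
    rw [List.exists_mem_cons_iff]
    simp only [pvAInner]
    split_ifs with h1 h2
    · rw [ih]
      simp [h1]
    · simp [not_not.mp h1, h2]
    · rw [ih]
      simp [h2]

lemma pvBInner_iff (s : List Char) (n : Int) (ds : List Int) :
    pvBInner s n ds = true ↔ ∃ d ∈ ds, PySem.Int.mod n d = 0 ∧
      PySem.List.slice s (some d) none = PySem.List.slice s none (some (-d)) := by
  induction ds with
  | nil => simp [pvBInner]
  | cons d rest ih =>
    rw [List.exists_mem_cons_iff]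
    simp only [pvBInner]
    split_ifs with h1
    · simp [h1]
    · rw [ih]
      simp [h1]

lemma pv_set_len_one {α : Type} [BEq α] [LawfulBEq α] (x : α) (xs : List α) :
    (PySem.Set.ofList (x :: xs)).length = 1 ↔ ∀ y ∈ xs, y = x := by
  rw [PySem.Set.ofList_cons]
  constructor
  · intro h y hy
    have hlen : ((PySem.Set.ofList xs).discard x).length = 0 := by
      simp only [List.length_cons] at h
      omega
    have hnil := List.eq_nil_of_length_eq_zero hlen
    by_contra hne
    have hmem : y ∈ (PySem.Set.ofList xs).discard x :=
      (PySem.Set.mem_discard _ x y).mpr ⟨(PySem.Set.mem_ofList _ _).mpr hy, hne⟩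
    rw [hnil] at hmem
    exact (List.not_mem_nil (a := y)) hmem
  · intro h
    have hnil : (PySem.Set.ofList xs).discard x = [] := by
      rw [List.eq_nil_iff_forall_not_mem]
      intro y hy
      obtain ⟨hy1, hy2⟩ := (PySem.Set.mem_discard _ x y).mp hy
      exact hy2 (h y ((PySem.Set.mem_ofList _ _).mp hy1))
    simp [hnil]

-- the chunk list, for a positive chunk size k dividing the length
lemma pv_chunksA_eq (s : List Char) (c k : Nat) (hk : 0 < k) (hc : 0 < c)
    (hN : s.length = c * k) :
    pvChunksA s (s.length : Int) (k : Int)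
      = (List.range c).map (fun j => (s.drop (j * k)).take k) := by
  unfold pvChunksA
  rw [PySem.List.pyRange_of_pos 0 (s.length : Int) (by exact_mod_cast hk)]
  have hpos : (0 : Int) < (s.length : Int) := by
    have : 0 < s.length := by rw [hN]; exact Nat.mul_pos hc hk
    exact_mod_cast this
  rw [if_pos hpos]
  have hcount : (((s.length : Int) - 0 + (k : Int) - 1) / (k : Int)).toNat = c := by
    have h1 : ((s.length : Int) - 0 + (k : Int) - 1) = ((c * k + (k - 1) : Nat) : Int) := by
      rw [hN]; push_cast [Nat.cast_sub (by omega : 1 ≤ k)]; ring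
    rw [h1, show ((c * k + (k - 1) : Nat) : Int) / (k : Int)
        = (((c * k + (k - 1)) / k : Nat) : Int) from by push_cast; ring]
    rw [Int.toNat_natCast]
    rw [Nat.mul_comm c k, Nat.mul_add_div hk]
    rw [Nat.div_eq_of_lt (by omega : k - 1 < k)]
    omega
  rw [hcount, List.map_map]
  apply List.map_congr_left
  intro j _
  simp only [Function.comp_apply]
  have harg : (0 + (k : Int) * (j : Int)) = ((j * k : Nat) : Int) := by push_cast; ring
  rw [harg, PySem.List.slice_natCast_add]

-- A's chunk test, for chunk count c ≥ 2 and chunk size k = L / c, says exactly pvRep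
lemma pv_chunkcond_iff (s : List Char) (c k : Nat) (h2 : 2 ≤ c) (hk : 0 < k)
    (hN : s.length = c * k) :
    (1 < (pvChunksA s (s.length : Int) (k : Int)).length ∧
      (PySem.Set.ofList (pvChunksA s (s.length : Int) (k : Int))).length = 1)
    ↔ pvRep s k c := by
  rw [pv_chunksA_eq s c k hk (by omega) hN]
  rw [← pv_chunks_iff_rep s k c hk hN]
  obtain ⟨c', rfl⟩ : ∃ c', c = c' + 1 := ⟨c - 1, by omega⟩
  rw [List.range_succ_eq_map, List.map_cons, List.map_map, pv_set_len_one]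
  simp only [List.length_cons, List.length_map, List.length_range, Nat.zero_mul,
    List.drop_zero, List.mem_map, List.mem_range, Function.comp_apply]
  constructor
  · intro ⟨_, h⟩ j hj
    cases j with
    | zero => simp
    | succ j =>
      have := h ((s.drop (Nat.succ j * k)).take k) ⟨j, by omega, rfl⟩
      simpa using this
  · intro h
    refine ⟨by omega, ?_⟩
    rintro y ⟨j, hj, rfl⟩
    have := h (j + 1) (by omega)
    simpa using this

-- A's inner loop over chunk counts finds a repetition iff some (k, c) decomposition works
lemma pv_A_exists (s : List Char) :
    pvAInner s (s.length : Int) (PySem.List.pyRange 2 ((s.length : Int) + 1) 1) = true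
    ↔ ∃ k c : Nat, 0 < k ∧ 2 ≤ c ∧ s.length = c * k ∧ pvRep s k c := by
  rw [pvAInner_iff]
  constructor
  · rintro ⟨ci, hmem, hmod, hcond⟩
    obtain ⟨h2, hlt⟩ := PySem.List.mem_pyRange_one.mp hmem
    obtain ⟨c, rfl⟩ : ∃ c : Nat, ci = (c : Int) := ⟨ci.toNat, by omega⟩
    have hc2 : 2 ≤ c := by exact_mod_cast h2
    have hcle : c ≤ s.length := by
      have : (c : Int) ≤ (s.length : Int) := by omega
      exact_mod_cast this
    have hdvd : c ∣ s.length := by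
      have := (PySem.Int.mod_eq_zero_iff_dvd _ _).mp hmod
      exact_mod_cast this
    have hfd : PySem.Int.floordiv (s.length : Int) (c : Int) = ((s.length / c : Nat) : Int) :=
      PySem.Int.floordiv_natCast _ _
    rw [hfd] at hcond
    refine ⟨s.length / c, c, ?_, hc2, ?_, ?_⟩
    · exact Nat.div_pos hcle (by omega)
    · exact (Nat.mul_div_cancel' hdvd).symm
    · exact (pv_chunkcond_iff s c (s.length / c) hc2
        (Nat.div_pos hcle (by omega)) (Nat.mul_div_cancel' hdvd).symm).mp hcond
  · rintro ⟨k, c, hk, hc2, hN, hrep⟩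
    refine ⟨(c : Int), ?_, ?_, ?_⟩
    · rw [PySem.List.mem_pyRange_one]
      have hcle : c ≤ s.length := by
        rw [hN]
        calc c = c * 1 := (Nat.mul_one c).symm
          _ ≤ c * k := Nat.mul_le_mul_left c hk
      constructor
      · exact_mod_cast hc2
      · have : (c : Int) ≤ (s.length : Int) := by exact_mod_cast hcle
        omega
    · rw [PySem.Int.mod_eq_zero_iff_dvd]
      have hdvd : c ∣ s.length := ⟨k, hN⟩
      exact_mod_cast hdvd
    · have hdiv : s.length / c = k := by
        rw [hN, Nat.mul_div_cancel_left k (by omega : 0 < c)]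
      rw [PySem.Int.floordiv_natCast, hdiv]
      exact (pv_chunkcond_iff s c k hc2 hk hN).mpr hrep

-- B's inner loop over shifts finds a repetition iff some (k, c) decomposition works
lemma pv_B_exists (s : List Char) :
    pvBInner s (s.length : Int) (PySem.List.pyRange 1 (s.length : Int) 1) = true
    ↔ ∃ k c : Nat, 0 < k ∧ 2 ≤ c ∧ s.length = c * k ∧ pvRep s k c := by
  rw [pvBInner_iff]
  constructor
  · rintro ⟨di, hmem, hmod, hsl⟩
    obtain ⟨h1, hlt⟩ := PySem.List.mem_pyRange_one.mp hmem
    obtain ⟨d, rfl⟩ : ∃ d : Nat, di = (d : Int) := ⟨di.toNat, by omega⟩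
    have hd1 : 1 ≤ d := by exact_mod_cast h1
    have hdlt : d < s.length := by exact_mod_cast hlt
    have hdvd : d ∣ s.length := by
      have := (PySem.Int.mod_eq_zero_iff_dvd _ _).mp hmod
      exact_mod_cast this
    rw [PySem.List.slice_from_natCast, PySem.List.slice_to_neg_natCast s d (by omega)] at hsl
    have hc2 : 2 ≤ s.length / d := by
      rcases hdvd with ⟨c, hc⟩
      have : 2 ≤ c := by
        rcases Nat.lt_or_ge c 2 with h | h
        · interval_cases c <;> omega
        · exact h
      rw [hc, Nat.mul_div_cancel_left c (by omega : 0 < d)]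
      exact this
    have hN : s.length = (s.length / d) * d := (Nat.div_mul_cancel hdvd).symm
    exact ⟨d, s.length / d, by omega, hc2, hN,
      (pv_shift_iff_rep s d (s.length / d) (by omega) hN).mp hsl⟩
  · rintro ⟨k, c, hk, hc2, hN, hrep⟩
    refine ⟨(k : Int), ?_, ?_, ?_⟩
    · rw [PySem.List.mem_pyRange_one]
      have hklt : k < s.length := by
        rw [hN]
        calc k < 2 * k := by omega
          _ ≤ c * k := Nat.mul_le_mul_right k hc2
      exact ⟨by exact_mod_cast hk, by exact_mod_cast hklt⟩
    · rw [PySem.Int.mod_eq_zero_iff_dvd]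
      exact_mod_cast (⟨c, by rw [hN, Nat.mul_comm]⟩ : k ∣ s.length)
    · rw [PySem.List.slice_from_natCast, PySem.List.slice_to_neg_natCast s k hk]
      exact (pv_shift_iff_rep s k c hk hN).mpr hrep

-- per-number agreement of the two inner loops
lemma pv_inner_eq (s : List Char) :
    pvAInner s (s.length : Int) (PySem.List.pyRange 2 ((s.length : Int) + 1) 1)
      = pvBInner s (s.length : Int) (PySem.List.pyRange 1 (s.length : Int) 1) := by
  rw [Bool.eq_iff_iff, pv_A_exists, pv_B_exists]

-- ===== VERDICT (by name: the statement is the Claim_ definition above) =====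
theorem find_all_repeating_spec : Claim_equal_find_all_repeating := by
  intro lower upper _
  unfold Spec_find_all_repeating find_all_repeating find_all_repeating_alt
  congr 1
  funext acc current
  rw [pv_inner_eq]
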